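-- pv_equiv track=rewrite | github.com/kdvkrs/aoc22 | day24/part1.py | step
-- ===== SOURCE A (Python) =====
-- def step(b, zz):
--     zn = [[[] for _ in l] for l in zz]
--     for r, zr in enumerate(zz):
--         for c, zc in enumerate(zr):
--             for z in zc:
--                 if z == ">":
--                     if b[r][c+1] == "#":
--                         zn[r][1].append(z)
--                     else:
--                         zn[r][c+1].append(z)
--                 elif z == "<":
--                     if b[r][c-1] == "#":
--                         zn[r][-2].append(z)
--                     else:
--                         zn[r][c-1].append(z)
--                 elif z == "^":
--                     if b[r-1][c] == "#":
--                         zn[-2][c].append(z)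
--                     else:
--                         zn[r-1][c].append(z)
--                 elif z == "v":
--                     if b[r+1][c] == "#":
--                         zn[1][c].append(z)
--                     else:
--                         zn[r+1][c].append(z)
--     return zn
-- ===== SOURCE B (Python) =====
-- # Gather/filter re-implementation: compute each blizzard's destination once into a flat
-- # arrival list, then build every output cell by collecting its arrivals (no in-place appends).
-- def step(b, zz):
--     H = len(zz)
--
--     def dest(r, c, z):
--         if z == ">":
--             return (r, 1) if b[r][c + 1] == "#" else (r, c + 1)
--         if z == "<":
--             w = len(zz[r])
--             return (r, w - 2) if b[r][c - 1] == "#" else (r, (c - 1) % w)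
--         if z == "^":
--             return (H - 2, c) if b[r - 1][c] == "#" else ((r - 1) % H, c)
--         if z == "v":
--             return (1, c) if b[r + 1][c] == "#" else (r + 1, c)
--         return None
--
--     arrivals = [(dest(r, c, z), z)
--                 for r, zr in enumerate(zz)
--                 for c, zc in enumerate(zr)
--                 for z in zc]
--     return [[[z for t, z in arrivals if t == (r, c)]
--              for c, _ in enumerate(zr)]
--             for r, zr in enumerate(zz)]
-- ===== Notes on version B (the rewrite author's own statement) =====
-- stated objective: alternative
-- what changed: A scatters: it mutates an output grid by appending each blizzard into its destination cell during the triple loop; B gathers: it computes a flat list of (destination, blizzard) pairs in one pass and then builds every output cell independently by filtering that arrival list, with destinations expressed arithmetically ((c-1) % w etc.) instead of negative-index mutation.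
import Mathlib
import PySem

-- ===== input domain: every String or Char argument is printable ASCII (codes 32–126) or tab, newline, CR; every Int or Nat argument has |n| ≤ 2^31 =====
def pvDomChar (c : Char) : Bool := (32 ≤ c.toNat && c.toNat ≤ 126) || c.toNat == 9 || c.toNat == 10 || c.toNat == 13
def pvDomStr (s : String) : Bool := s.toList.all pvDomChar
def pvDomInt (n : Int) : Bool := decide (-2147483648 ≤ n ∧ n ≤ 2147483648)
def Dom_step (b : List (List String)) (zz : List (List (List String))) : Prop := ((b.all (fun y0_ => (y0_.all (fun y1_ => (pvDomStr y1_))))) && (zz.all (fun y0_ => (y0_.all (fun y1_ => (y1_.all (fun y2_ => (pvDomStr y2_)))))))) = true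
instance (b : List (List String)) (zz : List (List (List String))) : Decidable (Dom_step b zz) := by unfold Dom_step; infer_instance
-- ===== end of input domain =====

-- B replaces A's mutate-and-scatter loop by a gather: one flat pass records every blizzard's
-- destination, and each output cell is then built by filtering that arrival list (objective: alternative).

-- ===== PORT A =====
-- b[i][j] as an optional read (none = IndexError, excluded by Pre_step)
def pvRead (b : List (List String)) (i j : Int) : Option String :=
  (PySem.List.pyGet? b i).bind (fun row => PySem.List.pyGet? row j)

-- the test  b[i][j] == "#"
def pvWall (b : List (List String)) (i j : Int) : Bool :=
  pvRead b i j == some "#"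

-- zn[i][j].append(z)  (functional update; out-of-range = no-op, excluded by Pre_step)
def pvAppendAt (zn : List (List (List String))) (i j : Int) (z : String) :
    List (List (List String)) :=
  match PySem.List.pyGet? zn i with
  | none => zn
  | some row =>
    match PySem.List.pyGet? row j with
    | none => zn
    | some cell => PySem.List.pySetD zn i (PySem.List.pySetD row j (cell ++ [z]))

-- the body of A's innermost loop, at blizzard t = (r, c, z)
def pvAct (b : List (List String)) (zn : List (List (List String)))
    (t : Int × Int × String) : List (List (List String)) :=
  if t.2.2 = ">" then
    (if pvWall b t.1 (t.2.1 + 1) then pvAppendAt zn t.1 1 t.2.2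
     else pvAppendAt zn t.1 (t.2.1 + 1) t.2.2)
  else if t.2.2 = "<" then
    (if pvWall b t.1 (t.2.1 - 1) then pvAppendAt zn t.1 (-2) t.2.2
     else pvAppendAt zn t.1 (t.2.1 - 1) t.2.2)
  else if t.2.2 = "^" then
    (if pvWall b (t.1 - 1) t.2.1 then pvAppendAt zn (-2) t.2.1 t.2.2
     else pvAppendAt zn (t.1 - 1) t.2.1 t.2.2)
  else if t.2.2 = "v" then
    (if pvWall b (t.1 + 1) t.2.1 then pvAppendAt zn 1 t.2.1 t.2.2
     else pvAppendAt zn (t.1 + 1) t.2.1 t.2.2)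
  else zn

def step (b : List (List String)) (zz : List (List (List String))) :
    List (List (List String)) :=
  (PySem.List.enumerate zz 0).foldl (fun zn rzr =>
    (PySem.List.enumerate rzr.2 0).foldl (fun zn czc =>
      czc.2.foldl (fun zn z => pvAct b zn (rzr.1, czc.1, z)) zn) zn)
    (zz.map (fun l => l.map (fun _ => ([] : List String))))

-- ===== PORT B =====
-- destination of blizzard z sitting at (r, c); none for a non-blizzard entry
def pvDest (b : List (List String)) (zz : List (List (List String)))
    (r c : Int) (z : String) : Option (Int × Int) :=
  if z = ">" then
    some (if pvWall b r (c + 1) then (r, 1) else (r, c + 1))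
  else if z = "<" then
    some (if pvWall b r (c - 1) then (r, ((PySem.List.pyGetD zz r []).length : Int) - 2)
          else (r, PySem.Int.mod (c - 1) ((PySem.List.pyGetD zz r []).length : Int)))
  else if z = "^" then
    some (if pvWall b (r - 1) c then ((zz.length : Int) - 2, c)
          else (PySem.Int.mod (r - 1) (zz.length : Int), c))
  else if z = "v" then
    some (if pvWall b (r + 1) c then ((1 : Int), c) else (r + 1, c))
  else none

-- [(dest(r,c,z), z) for r, zr in enumerate(zz) for c, zc in enumerate(zr) for z in zc]
def pvArrivals (b : List (List String)) (zz : List (List (List String))) :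
    List (Option (Int × Int) × String) :=
  (PySem.List.enumerate zz 0).flatMap (fun rzr =>
    (PySem.List.enumerate rzr.2 0).flatMap (fun czc =>
      czc.2.map (fun z => (pvDest b zz rzr.1 czc.1 z, z))))

def step_alt (b : List (List String)) (zz : List (List (List String))) :
    List (List (List String)) :=
  let arr := pvArrivals b zz
  (PySem.List.enumerate zz 0).map (fun rzr =>
    (PySem.List.enumerate rzr.2 0).map (fun czc =>
      (arr.filter (fun m => m.1 == some (rzr.1, czc.1))).map (fun m => m.2)))

-- ===== PRECONDITION & SPEC =====
-- Pre_step holds exactly when Python A raises no IndexError: every blizzard's wall probe into b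
-- is in range (a negative probe index wraps, as in Python) and its target cell exists in zn;
-- one clause per direction character.
def Pre_step (b : List (List String)) (zz : List (List (List String))) : Prop :=
  (∀ r : Nat, r < zz.length → ∀ c : Nat, c < (zz.getD r []).length →
    ∀ z ∈ (zz.getD r []).getD c [],
    z = ">" → (pvRead b (r : Int) ((c : Int) + 1)).isSome = true ∧
       (if pvWall b (r : Int) ((c : Int) + 1) then 2 ≤ (zz.getD r []).length
        else c + 1 < (zz.getD r []).length)) ∧
  (∀ r : Nat, r < zz.length → ∀ c : Nat, c < (zz.getD r []).length →
    ∀ z ∈ (zz.getD r []).getD c [],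
    z = "<" → (pvRead b (r : Int) ((c : Int) - 1)).isSome = true ∧
       (pvWall b (r : Int) ((c : Int) - 1) = true → 2 ≤ (zz.getD r []).length)) ∧
  (∀ r : Nat, r < zz.length → ∀ c : Nat, c < (zz.getD r []).length →
    ∀ z ∈ (zz.getD r []).getD c [],
    z = "^" → (pvRead b ((r : Int) - 1) (c : Int)).isSome = true ∧
       (if pvWall b ((r : Int) - 1) (c : Int) then
          2 ≤ zz.length ∧ c < (zz.getD (zz.length - 2) []).length
        else c < (zz.getD (if r = 0 then zz.length - 1 else r - 1) []).length)) ∧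
  (∀ r : Nat, r < zz.length → ∀ c : Nat, c < (zz.getD r []).length →
    ∀ z ∈ (zz.getD r []).getD c [],
    z = "v" → (pvRead b ((r : Int) + 1) (c : Int)).isSome = true ∧
       (if pvWall b ((r : Int) + 1) (c : Int) then
          2 ≤ zz.length ∧ c < (zz.getD 1 []).length
        else r + 1 < zz.length ∧ c < (zz.getD (r + 1) []).length))

instance (b : List (List String)) (zz : List (List (List String))) : Decidable (Pre_step b zz) := by
  unfold Pre_step
  refine instDecidableAnd (dq := instDecidableAnd (dq := instDecidableAnd))

def pvWitness_step : List (List String) × List (List (List String)) :=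
  ([["#", "#", "#", "#"], ["#", ".", ".", "#"], ["#", "#", "#", "#"]],
   [[[], [], [], []], [[], [">"], ["<", "v"], []], [[], [], [], []]])

def Spec_step (b : List (List String)) (zz : List (List (List String))) (out : List (List (List String))) : Prop := out = step_alt b zz
instance (b : List (List String)) (zz : List (List (List String))) (out : List (List (List String))) : Decidable (Spec_step b zz out) := by unfold Spec_step; infer_instance

-- ===== CLAIM (what is proved, stated in full; the proofs are below) =====
def Claim_equal_step : Prop := ∀ (b : List (List String)) (zz : List (List (List String))), Dom_step b zz → Pre_step b zz → Spec_step b zz (step b zz)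

-- ===== LEMMAS AND PROOFS =====

-- zn has the same row/column shape as zz
def pvShape (zz zn : List (List (List String))) : Prop :=
  zn.length = zz.length ∧ ∀ i : Nat, (zn.getD i []).length = (zz.getD i []).length

-- apply one arrival (target, z) to the grid
def pvApply (zn : List (List (List String))) (m : Option (Int × Int) × String) :
    List (List (List String)) :=
  match m.1 with
  | some p => pvAppendAt zn p.1 p.2 m.2
  | none => zn

-- normalized cell update
def pvSetCell (zn : List (List (List String))) (ti tj : Nat) (z : String) :
    List (List (List String)) :=
  zn.set ti ((zn.getD ti []).set tj (((zn.getD ti []).getD tj []) ++ [z]))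

-- flat source list of A's triple loop
def pvFlat (zz : List (List (List String))) : List (Int × Int × String) :=
  (PySem.List.enumerate zz 0).flatMap (fun rzr =>
    (PySem.List.enumerate rzr.2 0).flatMap (fun czc =>
      czc.2.map (fun z => (rzr.1, czc.1, z))))

def pvMk (b : List (List String)) (zz : List (List (List String)))
    (t : Int × Int × String) : Option (Int × Int) × String :=
  (pvDest b zz t.1 t.2.1 t.2.2, t.2.2)

-- every some-target of m is an in-range (nat, nat) cell of zz's shape
def pvGood (zz : List (List (List String))) (m : Option (Int × Int) × String) : Prop :=
  ∀ p : Int × Int, m.1 = some p →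
    ∃ (tr tc : Nat), p = ((tr : Int), (tc : Int)) ∧ tr < zz.length ∧ tc < (zz.getD tr []).length

-- t is a genuine source triple of zz
def pvSrc (zz : List (List (List String))) (t : Int × Int × String) : Prop :=
  ∃ (r c : Nat), t.1 = (r : Int) ∧ t.2.1 = (c : Int) ∧ r < zz.length ∧
    c < (zz.getD r []).length ∧ t.2.2 ∈ (zz.getD r []).getD c []

lemma pyIdx?_lt {n : Nat} {i : Int} {k : Nat} (h : PySem.List.pyIdx? n i = some k) : k < n := by
  unfold PySem.List.pyIdx? at h
  split_ifs at h <;> injection h with h' <;> omega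

lemma pyIdx?_natCast {n k : Nat} (h : k < n) : PySem.List.pyIdx? n (k : Int) = some k := by
  unfold PySem.List.pyIdx?
  rw [if_pos (Int.natCast_nonneg k), if_pos (by exact_mod_cast h)]
  simp

lemma pyIdx?_neg_one {n : Nat} (h : 1 ≤ n) : PySem.List.pyIdx? n (-1) = some (n - 1) := by
  unfold PySem.List.pyIdx?
  split_ifs with h1 h2 h3
  · exact absurd h1 (by norm_num)
  · exact absurd h1 (by norm_num)
  · norm_num
  · exact absurd (show -(n : Int) ≤ -1 by omega) h3

lemma pyIdx?_neg_two {n : Nat} (h : 2 ≤ n) : PySem.List.pyIdx? n (-2) = some (n - 2) := by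
  unfold PySem.List.pyIdx?
  split_ifs with h1 h2 h3
  · exact absurd h1 (by norm_num)
  · exact absurd h1 (by norm_num)
  · exact congrArg some (by omega)
  · exact absurd (show -(n : Int) ≤ -2 by omega) h3

lemma fm_natCast {k n : Nat} (h : k < n) : PySem.Int.mod (k : Int) (n : Int) = (k : Int) := by
  show Int.fmod _ _ = _
  rw [Int.fmod_eq_emod, if_pos (Or.inl (Int.natCast_nonneg n))]
  rw [Int.emod_eq_of_lt (by positivity) (by exact_mod_cast h)]
  ring

lemma fm_neg_one {n : Nat} (h : 1 ≤ n) : PySem.Int.mod (-1) (n : Int) = (n : Int) - 1 := by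
  show Int.fmod _ _ = _
  rw [Int.fmod_eq_emod, if_pos (Or.inl (Int.natCast_nonneg n))]
  have e : ((-1 : Int)) = ((n : Int) - 1) + (n : Int) * (-1) := by ring
  rw [e, Int.add_mul_emod_self_left,
    Int.emod_eq_of_lt (by omega) (by omega)]
  ring

lemma pvAppendAt_idx {zn : List (List (List String))} {i j : Int} {ti tj : Nat} {z : String}
    (h1 : PySem.List.pyIdx? zn.length i = some ti)
    (h2 : PySem.List.pyIdx? (zn.getD ti []).length j = some tj) :
    pvAppendAt zn i j z = pvSetCell zn ti tj z := by
  have hti := pyIdx?_lt h1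
  have htj := pyIdx?_lt h2
  have hrow : zn.getD ti [] = zn[ti] := List.getD_eq_getElem zn [] hti
  rw [hrow] at h2 htj
  unfold pvAppendAt pvSetCell
  simp only [PySem.List.pyGet?, PySem.List.pySetD, PySem.List.pySet?, h1, h2, Option.bind_some,
    Option.map_some, Option.getD_some, List.getElem?_eq_getElem hti,
    List.getElem?_eq_getElem htj, hrow, List.getD_eq_getElem zn[ti] [] htj]

lemma shape_setCell {zz zn : List (List (List String))} (hs : pvShape zz zn)
    (ti tj : Nat) (z : String) : pvShape zz (pvSetCell zn ti tj z) := by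
  obtain ⟨h1, h2⟩ := hs
  refine ⟨by simp [pvSetCell, h1], fun i => ?_⟩
  rw [← h2 i]
  unfold pvSetCell
  by_cases hi : i = ti
  · subst hi
    by_cases hlt : i < zn.length
    · simp [List.getD_eq_getElem?_getD, hlt]
    · simp [List.getD_eq_getElem?_getD, hlt]
  · simp [List.getD_eq_getElem?_getD, Ne.symm hi]

lemma getD_set' {α : Type} (l : List α) (i j : Nat) (v : α) (d : α) :
    (l.set i v).getD j d = if i = j ∧ i < l.length then v else l.getD j d := by
  by_cases h1 : i = j
  · subst h1
    by_cases h2 : i < l.length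
    · rw [List.getD_eq_getElem?_getD, List.getElem?_set, if_pos rfl, if_pos h2,
        Option.getD_some, if_pos ⟨rfl, h2⟩]
    · rw [List.getD_eq_getElem?_getD, List.getElem?_set, if_pos rfl, if_neg h2,
        Option.getD_none, if_neg (by tauto), List.getD_eq_getElem?_getD,
        List.getElem?_eq_none (by omega), Option.getD_none]
  · rw [List.getD_eq_getElem?_getD, List.getElem?_set, if_neg h1, if_neg (by tauto),
      List.getD_eq_getElem?_getD]

lemma getD_setCell {zn : List (List (List String))} {ti tj : Nat}
    (hti : ti < zn.length) (z : String) (r c : Nat) :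
    ((pvSetCell zn ti tj z).getD r []).getD c [] =
      if r = ti ∧ c = tj ∧ tj < (zn.getD ti []).length
      then ((zn.getD r []).getD c []) ++ [z]
      else (zn.getD r []).getD c [] := by
  unfold pvSetCell
  rw [getD_set']
  by_cases hr : ti = r
  · rw [if_pos ⟨hr, hti⟩]
    subst hr
    rw [getD_set']
    by_cases hc : tj = c
    · subst hc
      by_cases hj : tj < (zn.getD ti []).length
      · rw [if_pos ⟨rfl, hj⟩, if_pos ⟨rfl, rfl, hj⟩]
      · rw [if_neg (by tauto), if_neg (by tauto)]
    · rw [if_neg (by tauto), if_neg (by tauto)]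
  · rw [if_neg (by tauto), if_neg (by tauto)]

lemma shape_apply {zz zn : List (List (List String))} (hs : pvShape zz zn)
    {m : Option (Int × Int) × String} (hm : pvGood zz m) :
    pvShape zz (pvApply zn m) := by
  obtain ⟨mo, mz⟩ := m
  cases mo with
  | none => exact hs
  | some p =>
    obtain ⟨tr, tc, rfl, h1, h2⟩ := hm p rfl
    have e1 : PySem.List.pyIdx? zn.length ((tr : Nat) : Int) = some tr :=
      pyIdx?_natCast (by rw [hs.1]; exact h1)
    have e2 : PySem.List.pyIdx? (zn.getD tr []).length ((tc : Nat) : Int) = some tc :=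
      pyIdx?_natCast (by rw [hs.2 tr]; exact h2)
    show pvShape zz (pvAppendAt zn ((tr : Nat) : Int) ((tc : Nat) : Int) mz)
    rw [pvAppendAt_idx e1 e2]
    exact shape_setCell hs tr tc mz

lemma fold_apply {zz : List (List (List String))}
    (ms : List (Option (Int × Int) × String)) :
    ∀ zn, (∀ m ∈ ms, pvGood zz m) → pvShape zz zn →
      pvShape zz (ms.foldl pvApply zn) ∧
      ∀ r c : Nat, r < zz.length → c < (zz.getD r []).length →
        ((ms.foldl pvApply zn).getD r []).getD c [] =
          ((zn.getD r []).getD c []) ++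
            (ms.filter (fun m => m.1 == some ((r : Int), (c : Int)))).map (fun m => m.2) := by
  induction ms with
  | nil =>
    intro zn _ hs
    exact ⟨hs, fun r c _ _ => by simp⟩
  | cons m ms ih =>
    intro zn h hs
    have hm := h m (List.mem_cons_self ..)
    have hs' := shape_apply hs hm
    obtain ⟨ih1, ih2⟩ := ih (pvApply zn m)
      (fun m' hm' => h m' (List.mem_cons_of_mem _ hm')) hs'
    refine ⟨by simpa using ih1, fun r c hr hc => ?_⟩
    rw [List.foldl_cons, ih2 r c hr hc, List.filter_cons]
    obtain ⟨mo, mz⟩ := m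
    cases mo with
    | none =>
      simp [pvApply]
    | some p =>
      obtain ⟨tr, tc, rfl, h1, h2⟩ := hm p rfl
      have htr : tr < zn.length := by rw [hs.1]; exact h1
      have htc : tc < (zn.getD tr []).length := by rw [hs.2 tr]; exact h2
      have e1 : PySem.List.pyIdx? zn.length ((tr : Nat) : Int) = some tr := pyIdx?_natCast htr
      have e2 : PySem.List.pyIdx? (zn.getD tr []).length ((tc : Nat) : Int) = some tc :=
        pyIdx?_natCast htc
      have happ : pvApply zn (some ((tr : Int), (tc : Int)), mz) = pvSetCell zn tr tc mz := by
        show pvAppendAt zn ((tr : Nat) : Int) ((tc : Nat) : Int) mz = _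
        exact pvAppendAt_idx e1 e2
      rw [happ, getD_setCell htr mz r c]
      by_cases hrc : r = tr ∧ c = tc
      · obtain ⟨rfl, rfl⟩ := hrc
        rw [if_pos ⟨rfl, rfl, htc⟩]
        have hb : ((some ((r : Int), (c : Int)), mz).1 == some ((r : Int), (c : Int))) = true := by
          simp
        rw [hb]
        simp
      · have hb : ((some ((tr : Int), (tc : Int)), mz).1 == some ((r : Int), (c : Int))) = false := by
          simp only [beq_eq_false_iff_ne, ne_eq, Option.some.injEq, Prod.mk.injEq, not_and]
          intro hx hy
          exact absurd ⟨by exact_mod_cast hx.symm, by exact_mod_cast hy.symm⟩ hrc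
        rw [if_neg (by tauto), hb]
        simp

lemma good_elem {b : List (List String)} {zz : List (List (List String))}
    (hPre : Pre_step b zz) {t : Int × Int × String} (ht : pvSrc zz t) :
    pvGood zz (pvMk b zz t) := by
  obtain ⟨P1, P2, P3, P4⟩ := hPre
  obtain ⟨ti, ci, z⟩ := t
  obtain ⟨r, c, ht1, ht2, hr, hc, hz⟩ := ht
  dsimp only at ht1 ht2 hz
  subst ht1; subst ht2
  unfold pvMk pvDest
  dsimp only
  simp only [PySem.List.pyGetD_natCast]
  intro p hp
  by_cases h1 : z = ">"
  · obtain ⟨-, hcond⟩ := P1 r hr c hc z hz h1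
    rw [if_pos h1, Option.some_inj] at hp
    by_cases hw : pvWall b (r : Int) ((c : Int) + 1) = true
    · rw [if_pos hw] at hp hcond
      exact ⟨r, 1, by simp [hp], hr, by omega⟩
    · rw [if_neg hw] at hp hcond
      exact ⟨r, c + 1, by simp [hp], hr, hcond⟩
  · rw [if_neg h1] at hp
    by_cases h2 : z = "<"
    · obtain ⟨-, himp⟩ := P2 r hr c hc z hz h2
      rw [if_pos h2, Option.some_inj] at hp
      by_cases hw : pvWall b (r : Int) ((c : Int) - 1) = true
      · have h2W := himp hw
        rw [if_pos hw] at hp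
        refine ⟨r, (zz.getD r []).length - 2, hp.symm.trans ?_, hr, by omega⟩
        simp only [Prod.mk.injEq, true_and]
        push_cast [Nat.cast_sub h2W]
        ring
      · rw [if_neg hw] at hp
        by_cases hc0 : c = 0
        · subst hc0
          rw [show (((0 : Nat) : Int) - 1) = -1 by norm_num,
            fm_neg_one (by omega : 1 ≤ (zz.getD r []).length)] at hp
          refine ⟨r, (zz.getD r []).length - 1, hp.symm.trans ?_, hr, by omega⟩
          simp only [Prod.mk.injEq, true_and]
          push_cast [Nat.cast_sub (by omega : 1 ≤ (zz.getD r []).length)]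
          ring
        · rw [show ((c : Int) - 1) = ((c - 1 : Nat) : Int) by push_cast [Nat.cast_sub (by omega : 1 ≤ c)]; ring,
            fm_natCast (by omega : c - 1 < (zz.getD r []).length)] at hp
          exact ⟨r, c - 1, by simp [hp], hr, by omega⟩
    · rw [if_neg h2] at hp
      by_cases h3 : z = "^"
      · obtain ⟨-, hcond⟩ := P3 r hr c hc z hz h3
        rw [if_pos h3, Option.some_inj] at hp
        by_cases hw : pvWall b ((r : Int) - 1) (c : Int) = true
        · rw [if_pos hw] at hp; rw [if_pos hw] at hcond
          obtain ⟨h2H, hcol⟩ := hcond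
          refine ⟨zz.length - 2, c, hp.symm.trans ?_, by omega, hcol⟩
          simp only [Prod.mk.injEq, and_true]
          push_cast [Nat.cast_sub h2H]
          ring
        · rw [if_neg hw] at hp; rw [if_neg hw] at hcond
          by_cases hr0 : r = 0
          · subst hr0
            rw [show (((0 : Nat) : Int) - 1) = -1 by norm_num,
              fm_neg_one (by omega : 1 ≤ zz.length)] at hp
            rw [if_pos rfl] at hcond
            refine ⟨zz.length - 1, c, hp.symm.trans ?_, by omega, hcond⟩
            simp only [Prod.mk.injEq, and_true]
            push_cast [Nat.cast_sub (by omega : 1 ≤ zz.length)]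
            ring
          · rw [show ((r : Int) - 1) = ((r - 1 : Nat) : Int) by push_cast [Nat.cast_sub (by omega : 1 ≤ r)]; ring,
              fm_natCast (by omega : r - 1 < zz.length)] at hp
            rw [if_neg hr0] at hcond
            exact ⟨r - 1, c, by simp [hp], by omega, hcond⟩
      · rw [if_neg h3] at hp
        by_cases h4 : z = "v"
        · obtain ⟨-, hcond⟩ := P4 r hr c hc z hz h4
          rw [if_pos h4, Option.some_inj] at hp
          by_cases hw : pvWall b ((r : Int) + 1) (c : Int) = true
          · rw [if_pos hw] at hp; rw [if_pos hw] at hcond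
            exact ⟨1, c, by simp [hp], by omega, hcond.2⟩
          · rw [if_neg hw] at hp; rw [if_neg hw] at hcond
            exact ⟨r + 1, c, by simp [hp], hcond.1, hcond.2⟩
        · rw [if_neg h4] at hp
          exact absurd hp (by simp)

lemma pvApply_some (zn : List (List (List String))) (p : Int × Int) (z : String) :
    pvApply zn (some p, z) = pvAppendAt zn p.1 p.2 z := rfl

lemma act_elem {b : List (List String)} {zz : List (List (List String))}
    (hPre : Pre_step b zz) {t : Int × Int × String} (ht : pvSrc zz t)
    {zn : List (List (List String))} (hs : pvShape zz zn) :
    pvAct b zn t = pvApply zn (pvMk b zz t) := by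
  obtain ⟨P1, P2, P3, P4⟩ := hPre
  obtain ⟨ti, ci, z⟩ := t
  obtain ⟨r, c, ht1, ht2, hr, hc, hz⟩ := ht
  dsimp only at ht1 ht2 hz
  subst ht1; subst ht2
  have hlen : zn.length = zz.length := hs.1
  have er : PySem.List.pyIdx? zn.length ((r : Nat) : Int) = some r :=
    pyIdx?_natCast (by rw [hlen]; exact hr)
  have hW : (zn.getD r []).length = (zz.getD r []).length := hs.2 r
  unfold pvAct pvMk pvDest
  dsimp only
  simp only [PySem.List.pyGetD_natCast]
  by_cases h1 : z = ">"
  · obtain ⟨-, hcond⟩ := P1 r hr c hc z hz h1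
    simp only [if_pos h1]
    by_cases hw : pvWall b (r : Int) ((c : Int) + 1) = true
    · simp only [if_pos hw]
      rfl
    · simp only [if_neg hw]
      rfl
  · simp only [if_neg h1]
    by_cases h2 : z = "<"
    · obtain ⟨-, himp⟩ := P2 r hr c hc z hz h2
      simp only [if_pos h2]
      by_cases hw : pvWall b (r : Int) ((c : Int) - 1) = true
      · have h2W := himp hw
        simp only [if_pos hw, pvApply_some]
        rw [show (((zz.getD r []).length : Int) - 2) = (((zz.getD r []).length - 2 : Nat) : Int) by
            push_cast [Nat.cast_sub h2W]; ring]
        rw [pvAppendAt_idx er (by rw [hW]; exact pyIdx?_neg_two h2W),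
          pvAppendAt_idx er (by rw [hW]; exact pyIdx?_natCast (by omega))]
      · simp only [if_neg hw, pvApply_some]
        by_cases hc0 : c = 0
        · subst hc0
          rw [show (((0 : Nat) : Int) - 1) = -1 by norm_num,
            fm_neg_one (by omega : 1 ≤ (zz.getD r []).length)]
          rw [show (((zz.getD r []).length : Int) - 1) = (((zz.getD r []).length - 1 : Nat) : Int) by
              push_cast [Nat.cast_sub (by omega : 1 ≤ (zz.getD r []).length)]; ring]
          rw [pvAppendAt_idx er (by rw [hW]; exact pyIdx?_neg_one (by omega)),
            pvAppendAt_idx er (by rw [hW]; exact pyIdx?_natCast (by omega))]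
        · rw [show ((c : Int) - 1) = ((c - 1 : Nat) : Int) by
              push_cast [Nat.cast_sub (by omega : 1 ≤ c)]; ring,
            fm_natCast (by omega : c - 1 < (zz.getD r []).length)]
    · simp only [if_neg h2]
      by_cases h3 : z = "^"
      · obtain ⟨-, hcond⟩ := P3 r hr c hc z hz h3
        simp only [if_pos h3]
        by_cases hw : pvWall b ((r : Int) - 1) (c : Int) = true
        · rw [if_pos hw] at hcond
          obtain ⟨h2H, hcol⟩ := hcond
          simp only [if_pos hw, pvApply_some]
          rw [show ((zz.length : Int) - 2) = ((zz.length - 2 : Nat) : Int) by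
              push_cast [Nat.cast_sub h2H]; ring]
          rw [pvAppendAt_idx (by rw [hlen]; exact pyIdx?_neg_two h2H)
              (by rw [hs.2 (zz.length - 2)]; exact pyIdx?_natCast hcol),
            pvAppendAt_idx (by rw [hlen]; exact pyIdx?_natCast (by omega))
              (by rw [hs.2 (zz.length - 2)]; exact pyIdx?_natCast hcol)]
        · rw [if_neg hw] at hcond
          simp only [if_neg hw, pvApply_some]
          by_cases hr0 : r = 0
          · subst hr0
            rw [if_pos rfl] at hcond
            rw [show (((0 : Nat) : Int) - 1) = -1 by norm_num,
              fm_neg_one (by omega : 1 ≤ zz.length)]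
            rw [show ((zz.length : Int) - 1) = ((zz.length - 1 : Nat) : Int) by
                push_cast [Nat.cast_sub (by omega : 1 ≤ zz.length)]; ring]
            rw [pvAppendAt_idx (by rw [hlen]; exact pyIdx?_neg_one (by omega))
                (by rw [hs.2 (zz.length - 1)]; exact pyIdx?_natCast hcond),
              pvAppendAt_idx (by rw [hlen]; exact pyIdx?_natCast (by omega))
                (by rw [hs.2 (zz.length - 1)]; exact pyIdx?_natCast hcond)]
          · rw [if_neg hr0] at hcond
            rw [show ((r : Int) - 1) = ((r - 1 : Nat) : Int) by
                push_cast [Nat.cast_sub (by omega : 1 ≤ r)]; ring,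
              fm_natCast (by omega : r - 1 < zz.length)]
      · simp only [if_neg h3]
        by_cases h4 : z = "v"
        · simp only [if_pos h4]
          by_cases hw : pvWall b ((r : Int) + 1) (c : Int) = true
          · simp only [if_pos hw]
            rfl
          · simp only [if_neg hw]
            rfl
        · simp only [if_neg h4]
          rfl

lemma flat_fold {b : List (List String)} {zz : List (List (List String))}
    (hPre : Pre_step b zz) (ts : List (Int × Int × String)) :
    ∀ zn, (∀ t ∈ ts, pvSrc zz t) → pvShape zz zn →
      ts.foldl (pvAct b) zn = (ts.map (pvMk b zz)).foldl pvApply zn := by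
  induction ts with
  | nil => intro zn _ _; rfl
  | cons t ts ih =>
    intro zn h hs
    have ht := h t (List.mem_cons_self ..)
    rw [List.foldl_cons, List.map_cons, List.foldl_cons, act_elem hPre ht hs]
    exact ih _ (fun t' ht' => h t' (List.mem_cons_of_mem _ ht'))
      (shape_apply hs (good_elem hPre ht))

lemma mem_flat {zz : List (List (List String))} {t : Int × Int × String}
    (ht : t ∈ pvFlat zz) : pvSrc zz t := by
  simp only [pvFlat, List.mem_flatMap, List.mem_map, PySem.List.mem_enumerate_iff] at ht
  obtain ⟨rzr, ⟨r, hr, rfl⟩, czc, ⟨c, hc, rfl⟩, z, hz, rfl⟩ := ht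
  refine ⟨r, c, by simp, by simp, hr, ?_, ?_⟩
  · rw [List.getD_eq_getElem zz [] hr]; exact hc
  · rw [List.getD_eq_getElem zz [] hr, List.getD_eq_getElem _ [] hc]; exact hz

lemma step_eq_flat (b : List (List String)) (zz : List (List (List String))) :
    step b zz = (pvFlat zz).foldl (pvAct b)
      (zz.map (fun l => l.map (fun _ => ([] : List String)))) := by
  simp [step, pvFlat, List.foldl_flatMap, List.foldl_map]

lemma arrivals_eq (b : List (List String)) (zz : List (List (List String))) :
    pvArrivals b zz = (pvFlat zz).map (pvMk b zz) := by
  simp [pvArrivals, pvFlat, List.map_flatMap, List.map_map]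
  rfl

lemma shape_zero (zz : List (List (List String))) :
    pvShape zz (zz.map (fun l => l.map (fun _ => ([] : List String)))) := by
  refine ⟨by simp, fun i => ?_⟩
  rw [List.getD_eq_getElem?_getD, List.getD_eq_getElem?_getD, List.getElem?_map]
  cases h : zz[i]? with
  | none => rfl
  | some row => simp

lemma cell_zero (zz : List (List (List String))) (r c : Nat) :
    (((zz.map (fun l => l.map (fun _ => ([] : List String)))).getD r []).getD c []) = [] := by
  have h1 : (zz.map (fun l => l.map (fun _ => ([] : List String)))).getD r [] =
      (zz.getD r []).map (fun _ => ([] : List String)) := by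
    rw [List.getD_eq_getElem?_getD, List.getD_eq_getElem?_getD, List.getElem?_map]
    cases h : zz[r]? with
    | none => rfl
    | some row => rfl
  rw [h1, List.getD_eq_getElem?_getD, List.getElem?_map]
  cases h2 : (zz.getD r [])[c]? with
  | none => rfl
  | some x => rfl

-- ===== VERDICT (by name: the statement is the Claim_ definition above) =====
theorem step_spec : Claim_equal_step := by
  intro b zz _ hPre
  unfold Spec_step
  rw [step_eq_flat,
    flat_fold hPre _ _ (fun t ht => mem_flat ht) (shape_zero zz)]
  have hgood : ∀ m ∈ (pvFlat zz).map (pvMk b zz), pvGood zz m := by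
    intro m hm
    obtain ⟨t, ht, rfl⟩ := List.mem_map.1 hm
    exact good_elem hPre (mem_flat ht)
  obtain ⟨hshape, hcell⟩ := fold_apply _ _ hgood (shape_zero zz)
  have hlen_alt : (step_alt b zz).length = zz.length := by
    simp [step_alt, PySem.List.length_enumerate]
  apply List.ext_getElem
  · rw [hshape.1, hlen_alt]
  · intro r hr1 hr2
    have hrz : r < zz.length := by rw [← hshape.1]; exact hr1
    have hrow_alt : (step_alt b zz)[r] =
        (PySem.List.enumerate zz[r] 0).map (fun czc =>
          ((pvArrivals b zz).filter (fun m => m.1 == some ((r : Int), czc.1))).map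
            (fun m => m.2)) := by
      simp [step_alt, List.getElem_map, PySem.List.getElem_enumerate]
    have hrowlen : (List.foldl pvApply
        (zz.map (fun l => l.map (fun _ => ([] : List String))))
        ((pvFlat zz).map (pvMk b zz)))[r].length = zz[r].length := by
      have h := hshape.2 r
      rw [List.getD_eq_getElem _ [] hr1, List.getD_eq_getElem zz [] hrz] at h
      exact h
    apply List.ext_getElem
    · rw [hrowlen, hrow_alt]
      simp [PySem.List.length_enumerate]
    · intro c hc1 hc2
      have hcz : c < zz[r].length := by rw [← hrowlen]; exact hc1
      have hczD : c < (zz.getD r []).length := by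
        rw [List.getD_eq_getElem zz [] hrz]; exact hcz
      have hL := hcell r c hrz hczD
      rw [List.getD_eq_getElem _ [] hr1, List.getD_eq_getElem _ [] hc1, cell_zero,
        List.nil_append] at hL
      rw [hL, List.getElem_of_eq hrow_alt hc2, List.getElem_map,
        PySem.List.getElem_enumerate, ← arrivals_eq]
      norm_num
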